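-- pv_equiv track=rewrite | github.com/FaBitzen/AdventOfCode2020 | code/day10.py | splitupdata
-- ===== SOURCE A (Python) =====
-- def splitupdata(data, step=3):
--     head = 1
--     tail = 0
--     while head < len(data):
--         if data[head] - data[head - 1] == step:
--             yield data[tail:head]
--             tail = head
--         head += 1
--     yield data[tail:head]
-- ===== SOURCE B (Python) =====
-- def splitupdata(data, step=3):
--     chunk = []
--     for x in data:
--         if chunk and x - chunk[-1] == step:
--             yield chunk
--             chunk = [x]
--         else:
--             chunk.append(x)
--     yield chunk
-- ===== Notes on version B (the rewrite author's own statement) =====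
-- stated objective: alternative
-- what changed: A walks index cursors head/tail over the list and yields slices data[tail:head] at step-sized gaps; B never indexes or slices: it folds over the elements themselves, growing a current-chunk accumulator element by element and emitting it whenever the next element exceeds the chunk's last element by step (constant-factor win: no per-element indexing and no slice copies).
import Mathlib
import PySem

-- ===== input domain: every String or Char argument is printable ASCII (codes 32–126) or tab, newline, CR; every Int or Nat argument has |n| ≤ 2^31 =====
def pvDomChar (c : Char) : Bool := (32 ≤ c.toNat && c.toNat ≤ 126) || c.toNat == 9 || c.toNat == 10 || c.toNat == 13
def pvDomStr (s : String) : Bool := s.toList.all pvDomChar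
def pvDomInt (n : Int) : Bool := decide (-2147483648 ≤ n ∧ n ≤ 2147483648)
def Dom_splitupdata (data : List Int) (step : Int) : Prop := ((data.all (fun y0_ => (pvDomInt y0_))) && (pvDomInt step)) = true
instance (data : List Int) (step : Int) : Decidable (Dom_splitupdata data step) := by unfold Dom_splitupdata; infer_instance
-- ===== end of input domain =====

-- B replaces A's index-cursor loop with slicing (yield data[tail:head] at each gap) by an
-- element-wise fold that grows a current-chunk accumulator and never indexes or slices
-- (objective: alternative; same cost). Equivalence is about the list of yielded values
-- (both Pythons are generators, fully consumed).

-- ===== PORT A =====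
-- The while loop, as fuel recursion: fuel = number of remaining iterations (len(data) - head),
-- state (head, tail, acc); returns the final (head, tail, acc).
def splitupdataLoop (data : List Int) (step : Int) :
    Nat → Int → Int → List (List Int) → Int × Int × List (List Int)
  | 0, head, tail, acc => (head, tail, acc)
  | fuel + 1, head, tail, acc =>
    if PySem.List.pyGetD data head 0 - PySem.List.pyGetD data (head - 1) 0 = step then
      splitupdataLoop data step fuel (head + 1) head
        (acc ++ [PySem.List.slice data (some tail) (some head)])
    else
      splitupdataLoop data step fuel (head + 1) tail acc

def splitupdata (data : List Int) (step : Int) : List (List Int) :=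
  let r := splitupdataLoop data step (data.length - 1) 1 0 []
  r.2.2 ++ [PySem.List.slice data (some r.2.1) (some r.1)]

-- ===== PORT B =====
-- One fold step: 'if chunk and x - chunk[-1] == step: yield chunk; chunk = [x] else: chunk.append(x)'
def splitupdataStep (step : Int) (st : List (List Int) × List Int) (x : Int) :
    List (List Int) × List Int :=
  match st.2.getLast? with
  | some l => if x - l = step then (st.1 ++ [st.2], [x]) else (st.1, st.2 ++ [x])
  | none => (st.1, st.2 ++ [x])

def splitupdata_alt (data : List Int) (step : Int) : List (List Int) :=
  let r := data.foldl (splitupdataStep step) ([], [])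
  r.1 ++ [r.2]

-- ===== PRECONDITION & SPEC =====
def Spec_splitupdata (data : List Int) (step : Int) (out : List (List Int)) : Prop := out = splitupdata_alt data step
instance (data : List Int) (step : Int) (out : List (List Int)) : Decidable (Spec_splitupdata data step out) := by unfold Spec_splitupdata; infer_instance

-- ===== CLAIM (what is proved, stated in full; the proofs are below) =====
def Claim_equal_splitupdata : Prop := ∀ (data : List Int) (step : Int), Dom_splitupdata data step → Spec_splitupdata data step (splitupdata data step)

-- ===== LEMMAS AND PROOFS =====

-- The current chunk B carries after processing data[:h] from position tail is data[tail:h].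
-- Its last element (chunk nonempty, i.e. tail < h ≤ len) is data[h-1].
lemma splitupdata_chunk_getLast (data : List Int) (h tail : Nat)
    (htl : tail < h) (hh : h ≤ data.length) :
    ((data.take h).drop tail).getLast? = some (data[h - 1]'(by omega)) := by
  have hlen : ((data.take h).drop tail).length = h - tail := by
    simp [List.length_drop, List.length_take]; omega
  rw [List.getLast?_eq_getElem?, hlen]
  rw [List.getElem?_drop, List.getElem?_take_of_lt (by omega)]
  rw [List.getElem?_eq_getElem (by omega)]
  congr 1
  congr 1
  omega

-- A's loop on heads h, h+1, …, h+fuel-1 (then the final yield) produces the same list of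
-- chunks as B's fold over the remaining elements data[h:], started from B's state
-- (acc, current chunk data[tail:h]).
lemma splitupdata_loop_fold (data : List Int) (step : Int) :
    ∀ (fuel h tail : Nat) (acc : List (List Int)),
      h + fuel = data.length → tail < h →
      (splitupdataLoop data step fuel (h : Int) (tail : Int) acc).2.2
        ++ [PySem.List.slice data
              (some (splitupdataLoop data step fuel (h : Int) (tail : Int) acc).2.1)
              (some (splitupdataLoop data step fuel (h : Int) (tail : Int) acc).1)] =
      ((data.drop h).foldl (splitupdataStep step) (acc, (data.take h).drop tail)).1
        ++ [((data.drop h).foldl (splitupdataStep step) (acc, (data.take h).drop tail)).2] := by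
  intro fuel
  induction fuel with
  | zero =>
    intro h tail acc hlen htl
    have hh : h = data.length := by omega
    simp only [splitupdataLoop, hh, List.drop_length, List.foldl_nil]
    rw [PySem.List.slice_natCast, List.take_length,
      List.take_of_length_le (by rw [List.length_drop])]
  | succ f ih =>
    intro h tail acc hlen htl
    have hhlt : h < data.length := by omega
    have h1 : 1 ≤ h := by omega
    -- the loop's two reads are data[h] and data[h-1]
    have hget : PySem.List.pyGetD data (h : Int) 0 = data[h] := by
      rw [PySem.List.pyGetD_natCast]; exact List.getD_eq_getElem _ _ hhlt
    have hcast : ((h : Int) - 1) = ((h - 1 : Nat) : Int) := by omega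
    have hget' : PySem.List.pyGetD data ((h : Int) - 1) 0 = data[h - 1]'(by omega) := by
      rw [hcast, PySem.List.pyGetD_natCast]; exact List.getD_eq_getElem _ _ (by omega)
    -- B consumes data[h] next
    have hdrop : data.drop h = data[h] :: data.drop (h + 1) :=
      List.drop_eq_getElem_cons hhlt
    have hlast := splitupdata_chunk_getLast data h tail htl (le_of_lt hhlt)
    have htake : data.take (h + 1) = data.take h ++ [data[h]] := by
      rw [List.take_add_one, List.getElem?_eq_getElem hhlt]; rfl
    have hcast1 : ((h : Int) + 1) = ((h + 1 : Nat) : Int) := by omega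
    rw [splitupdataLoop, hget, hget', hdrop, List.foldl_cons]
    by_cases hc : data[h] - data[h - 1]'(by omega) = step
    · rw [if_pos hc, hcast1, ih (h + 1) h _ (by omega) (by omega)]
      have hstep : splitupdataStep step (acc, (data.take h).drop tail) data[h]
          = (acc ++ [(data.take h).drop tail], [data[h]]) := by
        simp [splitupdataStep, hlast, hc]
      rw [hstep]
      have hslice : PySem.List.slice data (some (tail : Int)) (some (h : Int))
          = (data.take h).drop tail := by
        rw [PySem.List.slice_natCast, List.drop_take]
      have hchunk : (data.take (h + 1)).drop h = [data[h]] := by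
        rw [htake, List.drop_append_of_le_length (by simp [List.length_take]; omega),
          List.drop_take]
        simp
      rw [hslice, hchunk]
    · rw [if_neg hc, hcast1, ih (h + 1) tail _ (by omega) (by omega)]
      have hstep : splitupdataStep step (acc, (data.take h).drop tail) data[h]
          = (acc, (data.take h).drop tail ++ [data[h]]) := by
        simp [splitupdataStep, hlast, hc]
      rw [hstep]
      have hchunk : (data.take (h + 1)).drop tail = (data.take h).drop tail ++ [data[h]] := by
        rw [htake, List.drop_append_of_le_length (by simp [List.length_take]; omega)]
      rw [hchunk]

-- ===== VERDICT (by name: the statement is the Claim_ definition above) =====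
theorem splitupdata_spec : Claim_equal_splitupdata := by
  intro data step _
  unfold Spec_splitupdata splitupdata splitupdata_alt
  cases data with
  | nil => simp [splitupdataLoop, PySem.List.slice, PySem.List.clampIdx]
  | cons x xs =>
    have hlen : ((x :: xs).length - 1 : Nat) = xs.length := by simp
    rw [hlen, show (1 : Int) = ((1 : Nat) : Int) by norm_num,
      show (0 : Int) = ((0 : Nat) : Int) by norm_num,
      splitupdata_loop_fold (x :: xs) step xs.length 1 0 []
        (by simp only [List.length_cons]; omega) (by omega)]
    simp [splitupdataStep]
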